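-- pv_equiv track=rewrite | github.com/subella/SoftDrone-ROS | softdrone_target_pose_estimator/notebooks/pose_estimation.py | get_visible_kpt_ids
-- ===== SOURCE A (Python) =====
-- def get_visible_kpt_ids(kpts_gt_pixels):
--     ids = []
--     idx = 0
--     for x, y, v in zip(*[iter(kpts_gt_pixels)]*3):
--         if v == 2:
--             ids.append(idx)
--         idx += 1
--     return ids
-- ===== SOURCE B (Python) =====
-- def get_visible_kpt_ids(kpts_gt_pixels):
--     vis = kpts_gt_pixels[2::3]
--     return [i for i, v in enumerate(vis) if v == 2]
-- ===== Notes on version B (the rewrite author's own statement) =====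
-- stated objective: idiomatic
-- what changed: B is two staged passes: it first slices out the visibility column with kpts_gt_pixels[2::3], then enumerates that single column and keeps the indices whose flag is 2, instead of A's single pass that regroups the flat list into (x,y,v) triples via zip(*[iter(..)]*3) with a manual index counter.
import Mathlib
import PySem

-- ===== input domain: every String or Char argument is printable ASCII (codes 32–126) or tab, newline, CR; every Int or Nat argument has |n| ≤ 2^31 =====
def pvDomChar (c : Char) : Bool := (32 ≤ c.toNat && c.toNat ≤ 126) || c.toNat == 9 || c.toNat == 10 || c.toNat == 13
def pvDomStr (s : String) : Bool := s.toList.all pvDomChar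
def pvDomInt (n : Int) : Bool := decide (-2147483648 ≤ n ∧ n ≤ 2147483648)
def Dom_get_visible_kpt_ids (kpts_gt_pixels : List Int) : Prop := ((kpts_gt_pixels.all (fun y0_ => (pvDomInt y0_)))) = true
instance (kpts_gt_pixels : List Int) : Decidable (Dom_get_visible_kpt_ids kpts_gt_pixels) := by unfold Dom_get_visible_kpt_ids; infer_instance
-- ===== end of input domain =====

-- B replaces A's triple-regrouping pass (zip(*[iter(..)]*3) with a manual counter) by two
-- staged passes: slice out the visibility column with [2::3], then enumerate it; objective: idiomatic.

-- ===== PORT A =====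
-- the 'for x, y, v in zip(*[iter(kpts)]*3)' loop: consume three elements at a time,
-- carrying the running index 'idx' and the accumulated 'ids' (built front-to-back here
-- by returning idx-cons, which yields the same append-order list)
def pvGoA : List Int → Int → List Int
  | _ :: _ :: v :: rest, idx =>
      if v = 2 then idx :: pvGoA rest (idx + 1) else pvGoA rest (idx + 1)
  | _, _ => []

def get_visible_kpt_ids (kpts_gt_pixels : List Int) : List Int :=
  pvGoA kpts_gt_pixels 0

-- ===== PORT B =====
-- vis = kpts[2::3]  (step 3 ≠ 0, so slice? is always some; .getD [] is exact there)
-- return [i for i, v in enumerate(vis) if v == 2]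
def get_visible_kpt_ids_alt (kpts_gt_pixels : List Int) : List Int :=
  let vis := (PySem.List.slice? kpts_gt_pixels (some 2) none 3).getD []
  ((PySem.List.enumerate vis 0).filter (fun p => p.2 == 2)).map (fun p => p.1)

-- ===== PRECONDITION & SPEC =====
def Spec_get_visible_kpt_ids (kpts_gt_pixels : List Int) (out : List Int) : Prop := out = get_visible_kpt_ids_alt kpts_gt_pixels
instance (kpts_gt_pixels : List Int) (out : List Int) : Decidable (Spec_get_visible_kpt_ids kpts_gt_pixels out) := by unfold Spec_get_visible_kpt_ids; infer_instance

-- ===== CLAIM (what is proved, stated in full; the proofs are below) =====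
def Claim_equal_get_visible_kpt_ids : Prop := ∀ (kpts_gt_pixels : List Int), Dom_get_visible_kpt_ids kpts_gt_pixels → Spec_get_visible_kpt_ids kpts_gt_pixels (get_visible_kpt_ids kpts_gt_pixels)

-- ===== LEMMAS AND PROOFS =====

-- the visibility column xs[2::3], totalised (slice? with step 3 never returns none)
def pvVis (xs : List Int) : List Int :=
  (PySem.List.slice? xs (some 2) none 3).getD []

theorem pvVis_nil : pvVis ([] : List Int) = [] := by decide

theorem pvVis_one (a : Int) : pvVis [a] = [] := by
  simp [pvVis, PySem.List.slice?, PySem.List.sliceIndices]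

theorem pvVis_two (a b : Int) : pvVis [a, b] = [] := by
  simp [pvVis, PySem.List.slice?, PySem.List.sliceIndices]

theorem pvVis_cons3 (x y v : Int) (rest : List Int) :
    pvVis (x :: y :: v :: rest) = v :: pvVis rest := by
  simp only [pvVis, PySem.List.slice?, PySem.List.sliceIndices]
  norm_num
  have h1 : (2:ℤ) ≤ ↑rest.length + 1 + 1 := by omega
  rw [if_pos h1]
  have hmin : min (2:ℤ) (↑rest.length + 1 + 1 + 1) = 2 := by omega
  rw [hmin]
  have hcnt : ((↑rest.length + 1 + 1 + 1 - 2 + 3 - 1 : ℤ) / 3).toNat = rest.length / 3 + 1 := by omega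
  rw [hcnt, List.range_succ_eq_map, List.filterMap_cons]
  have hz : ((2 : ℤ) + 3 * ((0:ℕ):ℤ)).toNat = 2 := by omega
  rw [hz]
  simp only [List.getElem?_cons_succ, List.getElem?_cons_zero]
  rw [List.filterMap_map]
  congr 1
  have hfun : ((fun k : ℕ => (x :: y :: v :: rest)[((2:ℤ) + 3 * ↑k).toNat]?) ∘ Nat.succ)
      = fun k : ℕ => rest[((2:ℤ) + 3 * ↑k).toNat]? := by
    funext k
    have hidx : ((2:ℤ) + 3 * ((k:ℤ) + 1)).toNat = (2 + 3 * (↑k:ℤ)).toNat + 1 + 1 + 1 := by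
      omega
    simp only [Function.comp, Nat.succ_eq_add_one, Nat.cast_add, Nat.cast_one, hidx,
      List.getElem?_cons_succ]
  rw [hfun]
  by_cases h2 : 2 < rest.length
  · rw [if_pos h2]
    have hmin2 : min (2:ℤ) (↑rest.length) = 2 := by omega
    have hcnt2 : ((↑rest.length - min 2 ↑rest.length + 3 - 1 : ℤ) / 3).toNat = rest.length / 3 := by
      rw [hmin2]; omega
    rw [hcnt2, hmin2]
  · rw [if_neg h2]
    have : rest.length / 3 = 0 := by omega
    rw [this]
    simp

theorem pvKey : ∀ (xs : List Int) (s : Int),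
    ((PySem.List.enumerate (pvVis xs) s).filter (fun p => p.2 == 2)).map (fun p => p.1)
      = pvGoA xs s
  | [], _ => by simp [pvVis_nil, pvGoA]
  | [a], _ => by simp [pvVis_one, pvGoA]
  | [a, b], _ => by simp [pvVis_two, pvGoA]
  | x :: y :: v :: rest, s => by
      have ih := pvKey rest (s + 1)
      rw [pvVis_cons3, PySem.List.enumerate_cons]
      by_cases hv : v = 2 <;> simp [pvGoA, hv, ih]

-- ===== VERDICT (by name: the statement is the Claim_ definition above) =====
theorem get_visible_kpt_ids_spec : Claim_equal_get_visible_kpt_ids := by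
  intro xs _
  unfold Spec_get_visible_kpt_ids get_visible_kpt_ids get_visible_kpt_ids_alt
  exact (pvKey xs 0).symm
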